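-- pv_equiv track=rewrite | github.com/eunjng5474/Algorithm | 프로그래머스/2/131704. 택배상자/택배상자.py | solution
-- ===== SOURCE A (Python) =====
-- def solution(order):
--     stack = []
--     idx = 0
--
--     for i in range(1, len(order) + 1):
--         stack.append(i)
--
--         while stack:
--             if stack[-1] != order[idx]:
--                 break
--             stack.pop()
--             idx += 1
--
--     return idx
-- ===== SOURCE B (Python) =====
-- def solution(order):
--     # One pass over `order`: pop the top when it matches, otherwise bulk-push
--     # the conveyor up to the requested box (which is then taken immediately).
--     n = len(order)
--     stack = []
--     pushed = 0
--     idx = 0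
--     while idx < n:
--         x = order[idx]
--         if stack and stack[-1] == x:
--             stack.pop()
--             idx += 1
--         elif pushed < x <= n:
--             stack.extend(range(pushed + 1, x))
--             pushed = x
--             idx += 1
--         else:
--             break
--     return idx
-- ===== Notes on version B (the rewrite author's own statement) =====
-- stated objective: alternative
-- what changed: B replaces A's outer loop over every conveyor box with its inner pop-while (pushing boxes one at a time) by a single pass over the order list that pops a matching top, bulk-pushes the conveyor run up to the requested box with one extend, or stops early; the loop is driven by the order index instead of the box number.
import Mathlib
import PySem

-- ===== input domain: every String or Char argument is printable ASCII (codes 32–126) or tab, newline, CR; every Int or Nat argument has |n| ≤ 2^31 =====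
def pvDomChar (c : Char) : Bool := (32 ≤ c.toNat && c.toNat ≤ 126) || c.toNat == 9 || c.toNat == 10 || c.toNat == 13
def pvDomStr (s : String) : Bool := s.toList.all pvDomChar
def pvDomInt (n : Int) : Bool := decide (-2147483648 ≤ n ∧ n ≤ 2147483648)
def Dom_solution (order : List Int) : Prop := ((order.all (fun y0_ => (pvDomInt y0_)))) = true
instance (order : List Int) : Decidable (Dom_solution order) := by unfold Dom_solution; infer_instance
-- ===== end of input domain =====

-- B replaces A's push-one-box-at-a-time simulation with a single pass over `order`
-- doing bulk pushes (objective: simpler one-pass decomposition; same return value).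

-- ===== PORT A =====
-- The stack is modelled head-as-top (Python appends/pops at the end of the list).
-- Inner `while stack:` loop of A; the access `order[idx]` could only raise for
-- idx ≥ len(order), which is unreachable in A (the stack depth always equals
-- i - idx, so a nonempty stack forces idx < len(order)); the port breaks there.
def popA (order : List Int) : List Int → Nat → List Int × Nat
  | [], idx => ([], idx)
  | t :: rest, idx =>
    if order[idx]? = some t then popA order rest (idx + 1)
    else (t :: rest, idx)

-- one iteration of A's outer `for i in range(1, len(order)+1)`: append i, then pop
def stepA (order : List Int) (s : List Int × Nat) (i : Int) : List Int × Nat :=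
  popA order (i :: s.1) s.2

def solution (order : List Int) : Int :=
  ((((PySem.List.pyRange 1 ((order.length : Int) + 1) 1).foldl (stepA order) ([], 0)).2 : Nat) : Int)

-- ===== PORT B =====
-- `while idx < n` of Source B ported with the explicit counter k = n - idx, which the
-- loop keeps exact (both continuing branches increment idx by 1 and spend one k);
-- k = 0 iff the loop condition idx < n fails. Stack head-as-top, so
-- `stack.extend(range(pushed+1, x))` is `(pyRange (pushed+1) x 1).reverse ++ stack`,
-- and `stack and stack[-1] == x` is `stack.head? = some x`.
def loopB (order : List Int) (n : Nat) : Nat → List Int → Int → Nat → Nat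
  | 0, _stack, _pushed, idx => idx
  | k + 1, stack, pushed, idx =>
    let x := order.getD idx 0
    if stack.head? = some x then loopB order n k stack.tail pushed (idx + 1)
    else if pushed < x ∧ x ≤ (n : Int) then
      loopB order n k ((PySem.List.pyRange (pushed + 1) x 1).reverse ++ stack) x (idx + 1)
    else idx

def solution_alt (order : List Int) : Int :=
  ((loopB order order.length order.length [] 0 0 : Nat) : Int)

-- ===== PRECONDITION & SPEC =====
def Spec_solution (order : List Int) (out : Int) : Prop := out = solution_alt order
instance (order : List Int) (out : Int) : Decidable (Spec_solution order out) := by unfold Spec_solution; infer_instance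

-- ===== CLAIM (what is proved, stated in full; the proofs are below) =====
def Claim_equal_solution : Prop := ∀ (order : List Int), Dom_solution order → Spec_solution order (solution order)

-- ===== LEMMAS AND PROOFS =====

-- a state is "stable" when A's inner pop loop would not fire: empty stack or top mismatch
def Stable (order : List Int) (st : List Int) (idx : Nat) : Prop :=
  ∀ t, st.head? = some t → order[idx]? ≠ some t

theorem popA_stable (order : List Int) :
    ∀ (st : List Int) (idx : Nat), Stable order (popA order st idx).1 (popA order st idx).2 := by
  intro st
  induction st with
  | nil => intro idx t h; simp [popA] at h
  | cons a rest ih =>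
    intro idx
    by_cases h : order[idx]? = some a
    · simpa [popA, h] using ih (idx + 1)
    · intro t ht
      simp only [popA, if_neg h] at ht ⊢
      have hat : a = t := by simpa using ht
      rw [← hat]; exact h

theorem popA_idx_le (order : List Int) :
    ∀ (st : List Int) (idx : Nat), idx ≤ order.length → (popA order st idx).2 ≤ order.length := by
  intro st
  induction st with
  | nil => intro idx h; simpa [popA] using h
  | cons a rest ih =>
    intro idx hidx
    by_cases h : order[idx]? = some a
    · have hlt : idx < order.length := by
        have := List.getElem?_eq_some_iff.mp h
        exact this.1
      simpa [popA, h] using ih (idx + 1) hlt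
    · simpa [popA, h] using hidx

-- B's pop branch mirrors A's inner pop loop exactly
theorem loopB_popA (order : List Int) :
    ∀ (st : List Int) (pushed : Int) (idx : Nat),
      loopB order order.length (order.length - idx) st pushed idx
        = loopB order order.length (order.length - (popA order st idx).2)
            (popA order st idx).1 pushed (popA order st idx).2 := by
  intro st
  induction st with
  | nil => intro pushed idx; simp [popA]
  | cons a rest ih =>
    intro pushed idx
    by_cases h : order[idx]? = some a
    · have hlt : idx < order.length := (List.getElem?_eq_some_iff.mp h).1
      have hgd : order.getD idx 0 = a := by
        simp [List.getD_eq_getElem?_getD, h]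
      have hfuel : order.length - idx = (order.length - (idx + 1)) + 1 := by omega
      rw [hfuel]
      simp only [loopB, List.head?_cons, hgd, List.tail_cons]
      rw [ih pushed (idx + 1)]
      simp [popA, h]
    · by_cases hlt : idx < order.length
      · have hgd : order.getD idx 0 ≠ a := by
          intro he
          apply h
          rw [List.getElem?_eq_getElem hlt]
          rw [← he]
          simp [List.getD_eq_getElem?_getD, List.getElem?_eq_getElem hlt]
        have hfuel : order.length - idx = (order.length - (idx + 1)) + 1 := by omega
        simp [popA, h]
      · have : order.length - idx = 0 := by omega
        simp [popA, h]

-- pushing A's next box kk+1 does not change B's result from a stable state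
theorem loopB_push (order : List Int) (st : List Int) (idx : Nat) (kk : Nat)
    (hk : kk < order.length) (hst : Stable order st idx) (hidx : idx ≤ order.length) :
    loopB order order.length (order.length - idx) st (kk : Int) idx
      = loopB order order.length (order.length - idx) (((kk : Int) + 1) :: st) ((kk : Int) + 1) idx := by
  rcases Nat.lt_or_ge idx order.length with hlt | hge
  · have hfuel : order.length - idx = (order.length - (idx + 1)) + 1 := by omega
    rw [hfuel]
    have hsome : order[idx]? = some (order.getD idx 0) := by
      rw [List.getElem?_eq_getElem hlt]
      simp [List.getD_eq_getElem?_getD, List.getElem?_eq_getElem hlt]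
    have hnot : ¬ st.head? = some (order.getD idx 0) := fun hh => hst _ hh hsome
    simp only [loopB, List.head?_cons, List.tail_cons]
    rw [if_neg hnot]
    by_cases hxe : order.getD idx 0 = (kk : Int) + 1
    · rw [if_pos (show (kk : Int) < order.getD idx 0 ∧ order.getD idx 0 ≤ (order.length : Int) from
            ⟨by omega, by omega⟩), if_pos (by rw [hxe])]
      rw [hxe, PySem.List.pyRange_one_eq_nil (by omega)]
      simp
    · rw [if_neg (fun hh => hxe (Option.some.inj hh).symm)]
      by_cases hcond : (kk : Int) + 1 < order.getD idx 0 ∧ order.getD idx 0 ≤ (order.length : Int)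
      · rw [if_pos ⟨by omega, hcond.2⟩, if_pos hcond,
            PySem.List.pyRange_one_cons (by omega)]
        simp
      · rw [if_neg (fun hh => hcond ⟨by omega, hh.2⟩), if_neg hcond]
  · have h0 : order.length - idx = 0 := by omega
    rw [h0]
    simp [loopB]

-- main synchronisation: A's remaining fold from box kk equals B's loop with pushed = kk
theorem mainSync (order : List Int) :
    ∀ (m kk : Nat) (st : List Int) (idx : Nat),
      m = order.length - kk → kk ≤ order.length → idx ≤ order.length → Stable order st idx →
      ((PySem.List.pyRange ((kk : Int) + 1) ((order.length : Int) + 1) 1).foldl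
          (stepA order) (st, idx)).2
        = loopB order order.length (order.length - idx) st (kk : Int) idx := by
  intro m
  induction m with
  | zero =>
    intro kk st idx hm hkk hidx hst
    have hkeq : kk = order.length := by omega
    subst hkeq
    rw [PySem.List.pyRange_one_eq_nil (by omega)]
    simp only [List.foldl_nil]
    rcases Nat.lt_or_ge idx order.length with hlt | hge
    · have hfuel : order.length - idx = (order.length - (idx + 1)) + 1 := by omega
      rw [hfuel]
      have hsome : order[idx]? = some (order.getD idx 0) := by
        rw [List.getElem?_eq_getElem hlt]
        simp [List.getD_eq_getElem?_getD, List.getElem?_eq_getElem hlt]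
      have hnot : ¬ st.head? = some (order.getD idx 0) := fun hh => hst _ hh hsome
      simp only [loopB]
      rw [if_neg hnot, if_neg (fun hh => by omega)]
    · have h0 : order.length - idx = 0 := by omega
      rw [h0]; simp [loopB]
  | succ m ih =>
    intro kk st idx hm hkk hidx hst
    have hk : kk < order.length := by omega
    have hcons : PySem.List.pyRange ((kk : Int) + 1) ((order.length : Int) + 1) 1
        = ((kk : Int) + 1) :: PySem.List.pyRange ((kk : Int) + 1 + 1) ((order.length : Int) + 1) 1 :=
      PySem.List.pyRange_one_cons (by exact_mod_cast Nat.succ_lt_succ hk)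
    rw [hcons]
    simp only [List.foldl_cons]
    have hstep : stepA order (st, idx) ((kk : Int) + 1)
        = popA order (((kk : Int) + 1) :: st) idx := rfl
    rw [hstep]
    set p := popA order (((kk : Int) + 1) :: st) idx with hp
    have hidx2 : p.2 ≤ order.length := popA_idx_le order _ idx hidx
    have hst2 : Stable order p.1 p.2 := popA_stable order _ idx
    have hcast : ((kk : Int) + 1) = (((kk + 1 : Nat)) : Int) := by push_cast; ring
    have hfold := ih (kk + 1) p.1 p.2 (by omega) (by omega) hidx2 hst2
    rw [hcast]
    have hLHS : ((PySem.List.pyRange (((kk + 1 : Nat) : Int) + 1) ((order.length : Int) + 1) 1).foldl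
        (stepA order) p).2
        = loopB order order.length (order.length - p.2) p.1 ((kk + 1 : Nat) : Int) p.2 := by
      rcases p with ⟨p1, p2⟩
      exact hfold
    rw [hLHS]
    rw [← hcast]
    rw [← loopB_popA order (((kk : Int) + 1) :: st) ((kk : Int) + 1) idx]
    exact (loopB_push order st idx kk hk hst hidx).symm

-- ===== VERDICT (by name: the statement is the Claim_ definition above) =====
theorem solution_spec : Claim_equal_solution := by
  intro order _
  unfold Spec_solution solution solution_alt
  have h := mainSync order order.length 0 [] 0 (by omega) (by omega) (by omega)
    (by intro t ht; simp at ht)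
  simp only [Nat.cast_zero, zero_add, Nat.sub_zero] at h
  rw [h]
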